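-- pv_equiv track=rewrite | github.com/HHS-Proclub/hhs-pro-club-website | solutions2020/PRA6/alakhotia015@student.fuhsd.org.py | howmanyroads
-- ===== SOURCE A (Python) =====
-- from collections import deque, defaultdict
--
-- def find_path_bfs(roads, start, goal):
--     graph = defaultdict(list)
--     for x,y in roads:
--         graph[x].append(y)
--         graph[y].append(x)
--     queue = deque([(set(), start)])
--     visited = set()
--     while queue:
--         path, current = queue.popleft()
--         if current == goal:
--             return path | set([current])
--         if current in visited: continue
--         visited.add(current)
--         for neighbour in graph[current]:
--             queue.append(( path | set([current]), neighbour))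
--     return set()
--
-- def howmanyroads(b,r,s,t, roads):
--     path = find_path_bfs(roads, s, t)
--     possibleroads = set(( (x,y) for x in range(1,b) for y in range(x+1,b+1) if (x,y) not in roads and not (x in path and y in path) ))
--     tot = 0
--     for x,y in possibleroads:
--         newroads = roads | {(x,y)}
--         newpath = find_path_bfs(newroads, s, t)
--         if len(newpath) >= len(path):
--             tot +=1
--     return tot
-- ===== SOURCE B (Python) =====
-- from collections import deque
--
--
-- def _dists(adj, src):
--     # node -> length of a shortest route from src, by one plain BFS
--     dist = {}
--     q = deque([(src, 0)])
--     while q: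
--         u, d = q.popleft()
--         if u in dist:
--             continue
--         dist[u] = d
--         for v in adj.get(u, []):
--             q.append((v, d + 1))
--     return dist
--
--
-- def _shortens(ds, dt, base, u, v):
--     # True if s -> u -> (new road) -> v -> t is a strictly shorter route
--     du, dv = ds.get(u), dt.get(v)
--     return du is not None and dv is not None and du + 1 + dv < base
--
--
-- def howmanyroads(b, r, s, t, roads):
--     adj = {}
--     for x, y in roads:
--         adj.setdefault(x, []).append(y)
--         adj.setdefault(y, []).append(x)
--
--     # the baseline path (the first one BFS reaches t by), for the on-path exclusion
--     path = []
--     queue = deque([([], s)])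
--     visited = set()
--     while queue:
--         trail, cur = queue.popleft()
--         if cur == t:
--             path = trail + [cur]
--             break
--         if cur in visited:
--             continue
--         visited.add(cur)
--         for nb in adj.get(cur, []):
--             queue.append((trail + [cur], nb))
--     onpath = set(path)
--
--     # distances from s and from t, once; each candidate edge then tests in O(1)
--     ds = _dists(adj, s)
--     dt = _dists(adj, t)
--     base = ds.get(t)  # None: t unreachable, so no new road can shorten the route
--
--     tot = 0
--     for x in range(1, b):
--         for y in range(x + 1, b + 1):
--             if (x, y) in roads or (x in onpath and y in onpath):
--                 continue
--             if base is not None and (_shortens(ds, dt, base, x, y)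
--                                      or _shortens(ds, dt, base, y, x)):
--                 continue
--             tot += 1
--     return tot
-- ===== Notes on version B (the rewrite author's own statement) =====
-- stated objective: faster
-- what changed: A re-runs a path-enumerating BFS over a rebuilt graph for every candidate road; B runs BFS twice in total (distance maps from s and from t), keeps A's single baseline-path BFS for the on-path exclusion, and decides each candidate in O(1) by checking whether min(ds[x]+1+dt[y], ds[y]+1+dt[x]) < ds[t].
import Mathlib
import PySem

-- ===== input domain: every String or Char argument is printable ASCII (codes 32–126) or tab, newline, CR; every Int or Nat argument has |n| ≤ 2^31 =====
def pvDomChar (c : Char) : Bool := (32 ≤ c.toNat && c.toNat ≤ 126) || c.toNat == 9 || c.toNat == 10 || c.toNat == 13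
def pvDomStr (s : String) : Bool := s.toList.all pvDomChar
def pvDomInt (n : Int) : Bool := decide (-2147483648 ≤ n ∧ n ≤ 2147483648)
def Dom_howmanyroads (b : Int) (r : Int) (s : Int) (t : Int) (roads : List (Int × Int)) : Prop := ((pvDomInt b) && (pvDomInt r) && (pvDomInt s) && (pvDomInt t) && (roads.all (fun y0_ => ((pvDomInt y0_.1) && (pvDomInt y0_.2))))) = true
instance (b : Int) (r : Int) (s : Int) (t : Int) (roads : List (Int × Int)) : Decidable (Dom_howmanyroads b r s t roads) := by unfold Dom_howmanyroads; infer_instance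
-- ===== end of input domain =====

-- B drops A's per-candidate BFS entirely: it computes the distance maps from s and from t once
-- (two plain BFS passes) and decides each candidate road by the O(1) arithmetic test
-- min(ds[x]+1+dt[y], ds[y]+1+dt[x]) < ds[t]; objective: faster (asymptotically fewer BFS runs).

-- ===== PORT A =====
-- find_path_bfs: graph = defaultdict(list); for x,y in roads: graph[x].append(y); graph[y].append(x)
def pvGraphA (roads : List (Int × Int)) : PySem.Dict Int (List Int) :=
  roads.foldl (fun g p =>
    PySem.Dict.modify (PySem.Dict.modify g p.1 [] (· ++ [p.2])) p.2 [] (· ++ [p.1]))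
    PySem.Dict.empty

-- the 'while queue:' loop; fuel bounds the number of pops: each node is expanded at most once,
-- so at most 1 + Σ degrees ≤ 2*len(roads)+1 entries are ever enqueued (hence popped)
def pvBfsA (graph : PySem.Dict Int (List Int)) (goal : Int) :
    Nat → List (PySem.Set Int × Int) → PySem.Set Int → PySem.Set Int
  | 0, _, _ => PySem.Set.ofList []
  | _ + 1, [], _ => PySem.Set.ofList []
  | fuel + 1, (path, current) :: rest, visited =>
      if current = goal then PySem.Set.union path [current]
      else if PySem.Set.contains visited current then pvBfsA graph goal fuel rest visited
      else pvBfsA graph goal fuel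
        (rest ++ (PySem.Dict.getD graph current []).map
          (fun nb => (PySem.Set.union path [current], nb)))
        (PySem.Set.add visited current)

def find_path_bfs (roads : List (Int × Int)) (start goal : Int) : PySem.Set Int :=
  pvBfsA (pvGraphA roads) goal (2 * roads.length + 2)
    [(PySem.Set.ofList [], start)] (PySem.Set.ofList [])

def howmanyroads (b : Int) (r : Int) (s : Int) (t : Int) (roads : List (Int × Int)) : Int :=
  let path := find_path_bfs roads s t
  let possibleroads : PySem.Set (Int × Int) := PySem.Set.ofList
    ((PySem.List.pyRange 1 b 1).flatMap (fun x =>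
      ((PySem.List.pyRange (x + 1) (b + 1) 1).filter (fun y =>
        !roads.contains (x, y) && !(PySem.Set.contains path x && PySem.Set.contains path y))).map
        (fun y => (x, y))))
  possibleroads.foldl (fun tot e =>
    let newroads := PySem.Set.union roads [e]
    let newpath := find_path_bfs newroads s t
    if PySem.Set.len path ≤ PySem.Set.len newpath then tot + 1 else tot) 0

-- ===== PORT B =====
def pvAdjB (roads : List (Int × Int)) : PySem.Dict Int (List Int) :=
  roads.foldl (fun a p =>
    PySem.Dict.modify (PySem.Dict.modify a p.1 [] (· ++ [p.2])) p.2 [] (· ++ [p.1]))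
    PySem.Dict.empty

-- the baseline trail-keeping BFS of Source B ('while queue: ... break'); fuel bounds pops as in pvBfsA
def pvTrailB (adj : PySem.Dict Int (List Int)) (goal : Int) :
    Nat → List (List Int × Int) → PySem.Set Int → List Int
  | 0, _, _ => []
  | _ + 1, [], _ => []
  | fuel + 1, (trail, cur) :: rest, visited =>
      if cur = goal then trail ++ [cur]
      else if PySem.Set.contains visited cur then pvTrailB adj goal fuel rest visited
      else pvTrailB adj goal fuel
        (rest ++ (PySem.Dict.getD adj cur []).map (fun nb => (trail ++ [cur], nb)))
        (PySem.Set.add visited cur)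

-- _dists: one plain BFS from src building the node -> distance dict; fuel bounds pops as above
def pvDistB (adj : PySem.Dict Int (List Int)) :
    Nat → List (Int × Nat) → PySem.Dict Int Nat → PySem.Dict Int Nat
  | 0, _, dist => dist
  | _ + 1, [], dist => dist
  | fuel + 1, (u, d) :: rest, dist =>
      if PySem.Dict.contains dist u then pvDistB adj fuel rest dist
      else pvDistB adj fuel
        (rest ++ (PySem.Dict.getD adj u []).map (fun v => (v, d + 1)))
        (PySem.Dict.insert dist u d)

-- _shortens(ds, dt, base, u, v)
def pvShortens (ds dt : PySem.Dict Int Nat) (base : Nat) (u v : Int) : Bool :=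
  match PySem.Dict.get? ds u, PySem.Dict.get? dt v with
  | some du, some dv => decide (du + 1 + dv < base)
  | _, _ => false

def howmanyroads_alt (b : Int) (r : Int) (s : Int) (t : Int) (roads : List (Int × Int)) : Int :=
  let adj := pvAdjB roads
  let path := pvTrailB adj t (2 * roads.length + 2) [([], s)] (PySem.Set.ofList [])
  let onpath : PySem.Set Int := PySem.Set.ofList path
  let ds := pvDistB adj (2 * roads.length + 2) [(s, 0)] PySem.Dict.empty
  let dt := pvDistB adj (2 * roads.length + 2) [(t, 0)] PySem.Dict.empty
  let base := PySem.Dict.get? ds t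
  (PySem.List.pyRange 1 b 1).foldl (fun tot x =>
    (PySem.List.pyRange (x + 1) (b + 1) 1).foldl (fun tot y =>
      if roads.contains (x, y) || (PySem.Set.contains onpath x && PySem.Set.contains onpath y) then
        tot
      else
        match base with
        | none => tot + 1
        | some bb =>
            if pvShortens ds dt bb x y || pvShortens ds dt bb y x then tot else tot + 1) tot) 0

-- ===== PRECONDITION & SPEC =====
def Spec_howmanyroads (b : Int) (r : Int) (s : Int) (t : Int) (roads : List (Int × Int)) (out : Int) : Prop := out = howmanyroads_alt b r s t roads
instance (b : Int) (r : Int) (s : Int) (t : Int) (roads : List (Int × Int)) (out : Int) : Decidable (Spec_howmanyroads b r s t roads out) := by unfold Spec_howmanyroads; infer_instance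

-- ===== CLAIM (what is proved, stated in full; the proofs are below) =====
def Claim_equal_howmanyroads : Prop := ∀ (b : Int) (r : Int) (s : Int) (t : Int) (roads : List (Int × Int)), Dom_howmanyroads b r s t roads → Spec_howmanyroads b r s t roads (howmanyroads b r s t roads)

-- ===== LEMMAS AND PROOFS =====

-- the symmetric edge relation the adjacency dict realises
def pvEdg (roads : List (Int × Int)) (u v : Int) : Prop := (u, v) ∈ roads ∨ (v, u) ∈ roads

-- walks of a given length in the road graph
def pvWalk (roads : List (Int × Int)) : Nat → Int → Int → Prop
  | 0, u, v => u = v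
  | n + 1, u, v => ∃ w, pvEdg roads u w ∧ pvWalk roads n w v

-- n is THE shortest walk length from u to v
def pvMinW (roads : List (Int × Int)) (u v : Int) (n : Nat) : Prop :=
  pvWalk roads n u v ∧ ∀ j < n, ¬ pvWalk roads j u v

theorem pv_union_singleton {α : Type} [BEq α] (s : PySem.Set α) (x : α) :
    PySem.Set.union s [x] = PySem.Set.add s x := by
  simp [PySem.Set.union, PySem.Set.update]

theorem pvGraphA_flat (roads : List (Int × Int)) (g : PySem.Dict Int (List Int)) :
    roads.foldl (fun g p =>
      PySem.Dict.modify (PySem.Dict.modify g p.1 [] (· ++ [p.2])) p.2 [] (· ++ [p.1])) g =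
    (roads.flatMap (fun p => [(p.1, p.2), (p.2, p.1)])).foldl
      (fun d p => PySem.Dict.modify d p.1 [] (· ++ [p.2])) g := by
  induction roads generalizing g with
  | nil => rfl
  | cons h tl ih => simp [List.flatMap_cons, ih]

theorem pvGraphA_getD (roads : List (Int × Int)) (c : Int) :
    PySem.Dict.getD (pvGraphA roads) c [] =
    ((roads.flatMap (fun p => [(p.1, p.2), (p.2, p.1)])).filter (fun p => p.1 == c)).map (·.2) := by
  rw [pvGraphA, pvGraphA_flat, PySem.Dict.getD_foldl_modify_append]
  simp

theorem pvFlat_mem (roads : List (Int × Int)) (a c : Int) :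
    (a, c) ∈ roads.flatMap (fun p => [(p.1, p.2), (p.2, p.1)]) ↔ pvEdg roads a c := by
  simp only [List.mem_flatMap, List.mem_cons, List.not_mem_nil, or_false, pvEdg,
    Prod.mk.injEq]
  constructor
  · rintro ⟨⟨q1, q2⟩, hq, (⟨rfl, rfl⟩ | ⟨rfl, rfl⟩)⟩
    · exact Or.inl hq
    · exact Or.inr hq
  · rintro (h | h)
    · exact ⟨(a, c), h, Or.inl ⟨rfl, rfl⟩⟩
    · exact ⟨(c, a), h, Or.inr ⟨rfl, rfl⟩⟩

theorem pv_mem_map_filter (l : List (Int × Int)) (u v : Int) :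
    v ∈ (l.filter (fun p => p.1 == u)).map (·.2) ↔ (u, v) ∈ l := by
  simp only [List.mem_map, List.mem_filter, beq_iff_eq]
  constructor
  · rintro ⟨⟨p1, p2⟩, ⟨hm, rfl⟩, rfl⟩; exact hm
  · intro h; exact ⟨(u, v), ⟨h, rfl⟩, rfl⟩

theorem pv_mem_adj (roads : List (Int × Int)) (u v : Int) :
    v ∈ PySem.Dict.getD (pvGraphA roads) u [] ↔ pvEdg roads u v := by
  rw [pvGraphA_getD, pv_mem_map_filter, pvFlat_mem]

-- basic walk lemmas
theorem pvEdg_symm {roads : List (Int × Int)} {u v : Int} (h : pvEdg roads u v) :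
    pvEdg roads v u := h.elim Or.inr Or.inl

theorem pvWalk_succ_iff (roads : List (Int × Int)) (n : Nat) (u v : Int) :
    pvWalk roads (n + 1) u v ↔ ∃ w, pvWalk roads n u w ∧ pvEdg roads w v := by
  induction n generalizing u with
  | zero =>
    constructor
    · rintro ⟨w, hw, h0⟩; exact ⟨u, rfl, by simpa [pvWalk] using (show w = v from h0) ▸ hw⟩
    · rintro ⟨w, hw, he⟩; exact ⟨v, (show u = w from hw) ▸ he, rfl⟩
  | succ n ih =>
    constructor
    · rintro ⟨w, he, hw⟩
      rcases (ih w).mp hw with ⟨z, hz, hzv⟩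
      exact ⟨z, ⟨w, he, hz⟩, hzv⟩
    · rintro ⟨z, ⟨w, he, hw⟩, hzv⟩
      exact ⟨w, he, (ih w).mpr ⟨z, hw, hzv⟩⟩

theorem pvWalk_snoc {roads : List (Int × Int)} {n : Nat} {u w v : Int}
    (h : pvWalk roads n u w) (he : pvEdg roads w v) : pvWalk roads (n + 1) u v :=
  (pvWalk_succ_iff roads n u v).mpr ⟨w, h, he⟩

theorem pvWalk_symm {roads : List (Int × Int)} :
    ∀ {n : Nat} {u v : Int}, pvWalk roads n u v → pvWalk roads n v u := by
  intro n
  induction n with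
  | zero => intro u v h; exact (show u = v from h).symm
  | succ n ih =>
    rintro u v ⟨w, he, hw⟩
    exact pvWalk_snoc (ih hw) (pvEdg_symm he)

theorem pvWalk_append {roads : List (Int × Int)} :
    ∀ {a : Nat} {u v : Int} {b : Nat} {w : Int},
      pvWalk roads a u v → pvWalk roads b v w → pvWalk roads (a + b) u w := by
  intro a
  induction a with
  | zero => intro u v b w h1 h2; simpa [(show u = v from h1)] using h2
  | succ a ih =>
    rintro u v b w ⟨z, he, hz⟩ h2
    have h : a + 1 + b = (a + b) + 1 := by omega
    rw [h]
    exact ⟨z, he, ih hz h2⟩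

theorem pvEdg_aug (roads : List (Int × Int)) (x y u v : Int) :
    pvEdg (roads ++ [(x, y)]) u v ↔ pvEdg roads u v ∨ (u = x ∧ v = y) ∨ (u = y ∧ v = x) := by
  simp only [pvEdg, List.mem_append, List.mem_singleton, Prod.mk.injEq]
  tauto

theorem pvWalk_mono {roads : List (Int × Int)} {e : Int × Int} :
    ∀ {n : Nat} {u v : Int}, pvWalk roads n u v → pvWalk (roads ++ [e]) n u v := by
  intro n
  induction n with
  | zero => intro u v h; exact h
  | succ n ih =>
    rintro u v ⟨w, he, hw⟩
    exact ⟨w, by rcases he with h | h <;> [exact Or.inl (by simp [h]); exact Or.inr (by simp [h])],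
      ih hw⟩

-- decomposition of a walk in the augmented graph: either it avoids the new road,
-- or it uses it and splits into two walks in the old graph
theorem pvWalk_decomp (roads : List (Int × Int)) (x y : Int) :
    ∀ (k : Nat) (u v : Int), pvWalk (roads ++ [(x, y)]) k u v →
      (∃ j ≤ k, pvWalk roads j u v) ∨
      ∃ a b, a + 1 + b ≤ k ∧
        ((pvWalk roads a u x ∧ pvWalk roads b y v) ∨ (pvWalk roads a u y ∧ pvWalk roads b x v)) := by
  intro k
  induction k with
  | zero => intro u v h; exact Or.inl ⟨0, Nat.le_refl 0, h⟩
  | succ k ih =>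
    rintro u v ⟨w, he, hw⟩
    rcases ih w v hw with ⟨j, hj, hwj⟩ | ⟨a, b, hab, hc⟩
    · rcases (pvEdg_aug roads x y u w).mp he with h | ⟨rfl, rfl⟩ | ⟨rfl, rfl⟩
      · exact Or.inl ⟨j + 1, by omega, ⟨w, h, hwj⟩⟩
      · exact Or.inr ⟨0, j, by omega, Or.inl ⟨rfl, hwj⟩⟩
      · exact Or.inr ⟨0, j, by omega, Or.inr ⟨rfl, hwj⟩⟩
    · rcases (pvEdg_aug roads x y u w).mp he with h | ⟨rfl, rfl⟩ | ⟨rfl, rfl⟩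
      · rcases hc with ⟨h1, h2⟩ | ⟨h1, h2⟩
        · exact Or.inr ⟨a + 1, b, by omega, Or.inl ⟨⟨w, h, h1⟩, h2⟩⟩
        · exact Or.inr ⟨a + 1, b, by omega, Or.inr ⟨⟨w, h, h1⟩, h2⟩⟩
      · rcases hc with ⟨h1, h2⟩ | ⟨h1, h2⟩
        · exact Or.inr ⟨0, b, by omega, Or.inl ⟨rfl, h2⟩⟩
        · exact Or.inl ⟨b, by omega, h2⟩
      · rcases hc with ⟨h1, h2⟩ | ⟨h1, h2⟩
        · exact Or.inl ⟨b, by omega, h2⟩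
        · exact Or.inr ⟨0, b, by omega, Or.inr ⟨rfl, h2⟩⟩

theorem pv_exists_minW {roads : List (Int × Int)} {u v : Int}
    (h : ∃ n, pvWalk roads n u v) : ∃ n, pvMinW roads u v n := by
  classical
  exact ⟨Nat.find h, Nat.find_spec h, fun j hj => Nat.find_min h hj⟩

theorem pvMinW_le {roads : List (Int × Int)} {u v : Int} {n k : Nat}
    (h : pvMinW roads u v n) (hk : pvWalk roads k u v) : n ≤ k := by
  by_contra hc
  exact h.2 k (by omega) hk

-- ===== the queue-BFS invariant and its consequences =====

-- invariant of a depth-annotated BFS queue from source S: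
-- entries are real walks; S is settled or initial; settled nodes have every neighbour settled
-- or queued one level deeper; queue depths are nondecreasing with spread ≤ 1
def pvInvQ (roads : List (Int × Int)) (S : Int) (Q : List (Nat × Int)) (V : List Int) : Prop :=
  (∀ p ∈ Q, pvWalk roads p.1 S p.2) ∧
  (S ∈ V ∨ (0, S) ∈ Q) ∧
  (∀ u, u ∈ V → ∀ k, pvWalk roads k S u → ∀ w, pvEdg roads u w →
    w ∈ V ∨ ∃ dd, (dd, w) ∈ Q ∧ dd ≤ k + 1) ∧
  Q.Pairwise (fun p q => p.1 ≤ q.1 ∧ q.1 ≤ p.1 + 1)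

-- every reachable node is settled or reachable through a queue entry without detour
theorem pvInvQ_reach {roads : List (Int × Int)} {S : Int} {Q : List (Nat × Int)} {V : List Int}
    (hinv : pvInvQ roads S Q V) :
    ∀ (k : Nat) (v : Int), pvWalk roads k S v →
      v ∈ V ∨ ∃ p ∈ Q, ∃ j, pvWalk roads j p.2 v ∧ p.1 + j ≤ k := by
  obtain ⟨hA, hC0, hE, _⟩ := hinv
  intro k
  induction k with
  | zero =>
    intro v h
    rcases hC0 with h0 | h0
    · exact Or.inl ((show S = v from h) ▸ h0)
    · exact Or.inr ⟨(0, S), h0, 0, (show S = v from h) ▸ rfl, by omega⟩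
  | succ k ih =>
    intro v h
    rcases (pvWalk_succ_iff roads k S v).mp h with ⟨u, hu, he⟩
    by_cases huV : u ∈ V
    · rcases hE u huV k hu v he with hv | ⟨dd, hdd, hle⟩
      · exact Or.inl hv
      · exact Or.inr ⟨(dd, v), hdd, 0, rfl, by omega⟩
    · rcases ih u hu with h' | ⟨p, hp, j, hw, hle⟩
      · exact absurd h' huV
      · exact Or.inr ⟨p, hp, j + 1, pvWalk_snoc hw he, by omega⟩

-- every node strictly below all queued depths is settled
theorem pvInvQ_vis {roads : List (Int × Int)} {S : Int} {Q : List (Nat × Int)} {V : List Int}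
    (hinv : pvInvQ roads S Q V) {k : Nat} {v : Int} (h : pvWalk roads k S v)
    (hlt : ∀ p ∈ Q, k < p.1) : v ∈ V := by
  rcases pvInvQ_reach hinv k v h with hv | ⟨p, hp, j, _, hle⟩
  · exact hv
  · exact absurd (hlt p hp) (by omega)

-- ===== the fuel potential =====
def pvRem (roads : List (Int × Int)) (V : List Int) : Nat :=
  ((roads.flatMap (fun p => [(p.1, p.2), (p.2, p.1)])).filter (fun p => !decide (p.1 ∈ V))).length

theorem pvFlat_len (roads : List (Int × Int)) :
    (roads.flatMap (fun p => [(p.1, p.2), (p.2, p.1)])).length = 2 * roads.length := by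
  induction roads with
  | nil => rfl
  | cons h tl ih => simp only [List.flatMap_cons, List.length_append, List.length_cons,
      List.length_nil, ih]; omega

theorem pvRem_nil (roads : List (Int × Int)) : pvRem roads [] = 2 * roads.length := by
  rw [pvRem, ← pvFlat_len roads]
  congr 1
  simp

theorem pvRem_aux (V : List Int) (cur : Int) (h : cur ∉ V) :
    ∀ l : List (Int × Int),
      (l.filter (fun p => !decide (p.1 ∈ V))).length =
        (l.filter (fun p => !decide (p.1 ∈ V ++ [cur]))).length +
          (l.filter (fun p => p.1 == cur)).length := by
  intro l
  induction l with
  | nil => rfl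
  | cons p l ih =>
    by_cases hp : p.1 = cur
    · simp [hp, h, ih]; omega
    · by_cases hv : p.1 ∈ V <;> simp [hp, hv, ih]; omega

theorem pvRem_split (roads : List (Int × Int)) (V : List Int) (cur : Int) (h : cur ∉ V) :
    pvRem roads V =
      pvRem roads (V ++ [cur]) + (PySem.Dict.getD (pvGraphA roads) cur []).length := by
  rw [pvRem, pvRem, pvGraphA_getD, List.length_map]
  exact pvRem_aux V cur h _

-- ===== a depth-only mirror of A's BFS (proof helper) =====
def pvDqA (g : PySem.Dict Int (List Int)) (goal : Int) :
    Nat → List (Nat × Int) → List Int → Nat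
  | 0, _, _ => 0
  | _ + 1, [], _ => 0
  | fuel + 1, (d, cur) :: rest, visited =>
      if cur = goal then d + 1
      else if PySem.Set.contains visited cur then pvDqA g goal fuel rest visited
      else pvDqA g goal fuel
        (rest ++ (PySem.Dict.getD g cur []).map (fun nb => (d + 1, nb)))
        (PySem.Set.add visited cur)

-- the trail invariant shared by the lockstep simulations: every stored trail lies inside
-- visited and never contains the goal
def pvInv (goal : Int) (q : List (List Int × Int)) (visited : List Int) : Prop :=
  ∀ p ∈ q, (∀ a ∈ p.1, a ∈ visited) ∧ goal ∉ p.1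

-- lockstep: A's path-set-carrying BFS and B's trail-list BFS run the same loop
theorem pvBfsA_eq_pvTrailB (G : PySem.Dict Int (List Int)) (goal : Int) :
    ∀ (fuel : Nat) (q : List (List Int × Int)) (visited : List Int),
      pvInv goal q visited → pvBfsA G goal fuel q visited = pvTrailB G goal fuel q visited := by
  intro fuel
  induction fuel with
  | zero => intro q visited _; rfl
  | succ fuel ih =>
    intro q visited hinv
    match q with
    | [] => rfl
    | (path, cur) :: rest =>
      have hhead := hinv (path, cur) (List.mem_cons_self ..)
      have hrest : pvInv goal rest visited := fun p hp => hinv p (List.mem_cons_of_mem _ hp)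
      simp only [pvBfsA, pvTrailB]
      by_cases hg : cur = goal
      · subst hg
        rw [if_pos rfl, if_pos rfl, pv_union_singleton, PySem.Set.add_of_not_mem hhead.2]
      · rw [if_neg hg, if_neg hg]
        by_cases hv : PySem.Set.contains visited cur
        · rw [if_pos hv, if_pos hv]; exact ih rest visited hrest
        · rw [if_neg hv, if_neg hv]
          have hcv : cur ∉ visited := fun h => hv ((PySem.Set.contains_iff visited cur).mpr h)
          have hcp : cur ∉ path := fun h => hcv (hhead.1 cur h)
          rw [pv_union_singleton, PySem.Set.add_of_not_mem hcp]
          apply ih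
          intro p hp
          rcases List.mem_append.mp hp with h | h
          · have := hrest p h
            exact ⟨fun a ha => (PySem.Set.mem_add _ _ _).mpr (Or.inl (this.1 a ha)), this.2⟩
          · rcases List.mem_map.mp h with ⟨nb, _, rfl⟩
            constructor
            · intro a ha
              rcases List.mem_append.mp ha with h' | h'
              · exact (PySem.Set.mem_add _ _ _).mpr (Or.inl (hhead.1 a h'))
              · simp at h'; subst h'; exact (PySem.Set.mem_add _ _ _).mpr (Or.inr rfl)
            · intro hcontra
              rcases List.mem_append.mp hcontra with h' | h'
              · exact hhead.2 h'
              · simp at h'; exact hg h'.symm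

-- lockstep: A's BFS produces a set whose size is exactly what the depth-only BFS returns
theorem pvBfsA_len_eq_pvDqA (G : PySem.Dict Int (List Int)) (goal : Int) :
    ∀ (fuel : Nat) (q : List (List Int × Int)) (visited : List Int),
      pvInv goal q visited →
      pvDqA G goal fuel (q.map (fun p => (p.1.length, p.2))) visited =
        (pvBfsA G goal fuel q visited).length := by
  intro fuel
  induction fuel with
  | zero => intro q visited _; rfl
  | succ fuel ih =>
    intro q visited hinv
    match q with
    | [] => rfl
    | (path, cur) :: rest =>
      have hhead := hinv (path, cur) (List.mem_cons_self ..)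
      have hrest : pvInv goal rest visited := fun p hp => hinv p (List.mem_cons_of_mem _ hp)
      simp only [List.map_cons, pvBfsA, pvDqA]
      by_cases hg : cur = goal
      · subst hg
        rw [if_pos rfl, if_pos rfl, pv_union_singleton, PySem.Set.add_of_not_mem hhead.2]
        simp
      · rw [if_neg hg, if_neg hg]
        by_cases hv : PySem.Set.contains visited cur
        · rw [if_pos hv, if_pos hv]; exact ih rest visited hrest
        · rw [if_neg hv, if_neg hv]
          have hcv : cur ∉ visited := fun h => hv ((PySem.Set.contains_iff visited cur).mpr h)
          have hcp : cur ∉ path := fun h => hcv (hhead.1 cur h)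
          rw [pv_union_singleton, PySem.Set.add_of_not_mem hcp]
          have hq : (rest ++ (PySem.Dict.getD G cur []).map (fun nb => (path ++ [cur], nb))).map
              (fun p => (p.1.length, p.2)) =
              rest.map (fun p => (p.1.length, p.2)) ++
              (PySem.Dict.getD G cur []).map (fun nb => (path.length + 1, nb)) := by
            rw [List.map_append, List.map_map]
            congr 1
            simp [Function.comp]
          rw [← hq]
          apply ih
          intro p hp
          rcases List.mem_append.mp hp with h | h
          · have := hrest p h
            exact ⟨fun a ha => (PySem.Set.mem_add _ _ _).mpr (Or.inl (this.1 a ha)), this.2⟩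
          · rcases List.mem_map.mp h with ⟨nb, _, rfl⟩
            constructor
            · intro a ha
              rcases List.mem_append.mp ha with h' | h'
              · exact (PySem.Set.mem_add _ _ _).mpr (Or.inl (hhead.1 a h'))
              · simp at h'; subst h'; exact (PySem.Set.mem_add _ _ _).mpr (Or.inr rfl)
            · intro hcontra
              rcases List.mem_append.mp hcontra with h' | h'
              · exact hhead.2 h'
              · simp at h'; exact hg h'.symm

-- ===== correctness of the depth-only BFS =====
theorem pvDqA_correct (roads : List (Int × Int)) (S goal : Int) :
    ∀ (fuel : Nat) (Q : List (Nat × Int)) (V : List Int),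
      pvInvQ roads S Q V → goal ∉ V → Q.length + pvRem roads V ≤ fuel →
      (∀ n, pvMinW roads S goal n → pvDqA (pvGraphA roads) goal fuel Q V = n + 1) ∧
      ((∀ n, ¬ pvWalk roads n S goal) → pvDqA (pvGraphA roads) goal fuel Q V = 0) := by
  intro fuel
  induction fuel with
  | zero =>
    intro Q V hinv hg hfuel
    have hQ : Q = [] := by cases Q with | nil => rfl | cons p l => simp at hfuel
    subst hQ
    constructor
    · intro n hmin
      rcases pvInvQ_reach hinv n goal hmin.1 with hv | ⟨p, hp, _⟩
      · exact absurd hv hg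
      · simp at hp
    · intro _; rfl
  | succ fuel ih =>
    intro Q V hinv hg hfuel
    match Q with
    | [] =>
      constructor
      · intro n hmin
        rcases pvInvQ_reach hinv n goal hmin.1 with hv | ⟨p, hp, _⟩
        · exact absurd hv hg
        · simp at hp
      · intro _; rfl
    | (d, cur) :: rest =>
      obtain ⟨hA, hC0, hE, hOrd⟩ := hinv
      have hAhead : pvWalk roads d S cur := hA (d, cur) (List.mem_cons_self ..)
      have hOrdHead := (List.pairwise_cons.mp hOrd).1
      have hOrdRest := (List.pairwise_cons.mp hOrd).2
      simp only [pvDqA]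
      by_cases hgoal : cur = goal
      · subst hgoal
        rw [if_pos rfl]
        constructor
        · intro n hmin
          have hnd : n ≤ d := pvMinW_le hmin hAhead
          have : ¬ n < d := by
            intro hlt
            apply hg
            apply pvInvQ_vis ⟨hA, hC0, hE, hOrd⟩ hmin.1
            intro p hp
            rcases List.mem_cons.mp hp with rfl | hp'
            · exact hlt
            · have := (hOrdHead p hp').1; omega
          omega
        · intro hno; exact absurd hAhead (hno d)
      · rw [if_neg hgoal]
        by_cases hvis : PySem.Set.contains V cur
        · rw [if_pos hvis]
          have hcurV : cur ∈ V := (PySem.Set.contains_iff V cur).mp hvis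
          apply ih rest V ?_ hg ?_
          · refine ⟨fun p hp => hA p (List.mem_cons_of_mem _ hp), ?_, ?_, hOrdRest⟩
            · rcases hC0 with h | h
              · exact Or.inl h
              · rcases List.mem_cons.mp h with he | h'
                · injection he with h1 h2
                  exact Or.inl (by rw [h2]; exact hcurV)
                · exact Or.inr h'
            · intro u hu k hk w hew
              rcases hE u hu k hk w hew with hw | ⟨dd, hdd, hle⟩
              · exact Or.inl hw
              · rcases List.mem_cons.mp hdd with he | h'
                · injection he with h1 h2
                  exact Or.inl (by rw [h2]; exact hcurV)
                · exact Or.inr ⟨dd, h', hle⟩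
          · simp only [List.length_cons] at hfuel
            omega
        · rw [if_neg hvis]
          have hcurV : cur ∉ V := fun h => hvis ((PySem.Set.contains_iff V cur).mpr h)
          have hmind : ∀ k, pvWalk roads k S cur → d ≤ k := by
            intro k hk
            by_contra hlt
            apply hcurV
            apply pvInvQ_vis ⟨hA, hC0, hE, hOrd⟩ hk
            intro p hp
            rcases List.mem_cons.mp hp with rfl | hp'
            · omega
            · have := (hOrdHead p hp').1; omega
          rw [PySem.Set.add_of_not_mem hcurV]
          apply ih _ _ ?_ ?_ ?_
          · refine ⟨?_, ?_, ?_, ?_⟩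
            · intro p hp
              rcases List.mem_append.mp hp with h | h
              · exact hA p (List.mem_cons_of_mem _ h)
              · rcases List.mem_map.mp h with ⟨nb, hnb, rfl⟩
                exact pvWalk_snoc hAhead ((pv_mem_adj roads cur nb).mp hnb)
            · rcases hC0 with h | h
              · exact Or.inl (List.mem_append.mpr (Or.inl h))
              · rcases List.mem_cons.mp h with he | h'
                · injection he with h1 h2
                  exact Or.inl (List.mem_append.mpr (Or.inr (by rw [h2]; simp)))
                · exact Or.inr (List.mem_append.mpr (Or.inl h'))
            · intro u hu k hk w hew
              rcases List.mem_append.mp hu with huV | hucur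
              · rcases hE u huV k hk w hew with hw | ⟨dd, hdd, hle⟩
                · exact Or.inl (List.mem_append.mpr (Or.inl hw))
                · rcases List.mem_cons.mp hdd with he | h'
                  · injection he with h1 h2
                    exact Or.inl (List.mem_append.mpr (Or.inr (by rw [h2]; simp)))
                  · exact Or.inr ⟨dd, List.mem_append.mpr (Or.inl h'), hle⟩
              · have hucur : u = cur := by simpa using hucur
                subst hucur
                have hle : d + 1 ≤ k + 1 := by have := hmind k hk; omega
                refine Or.inr ⟨d + 1, List.mem_append.mpr (Or.inr ?_), hle⟩
                exact List.mem_map.mpr ⟨w, (pv_mem_adj roads u w).mpr hew, rfl⟩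
            · rw [List.pairwise_append]
              refine ⟨hOrdRest, ?_, ?_⟩
              · rw [List.pairwise_map]
                exact List.pairwise_of_forall (fun a b => ⟨Nat.le_refl _, by omega⟩)
              · intro a ha b hb
                rcases List.mem_map.mp hb with ⟨nb, _, rfl⟩
                have := hOrdHead a ha
                exact ⟨by omega, by omega⟩
          · intro h
            rcases List.mem_append.mp h with h | h
            · exact hg h
            · have hgc : goal = cur := by simpa using h
              exact hgoal hgc.symm
          · rw [List.length_append, List.length_map]
            have hsplit := pvRem_split roads V cur hcurV
            simp only [List.length_cons] at hfuel
            omega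

-- ===== correctness of B's distance BFS-- ===== correctness of B's distance BFS =====
theorem pvDistB_correct (roads : List (Int × Int)) (S : Int) :
    ∀ (fuel : Nat) (Q : List (Int × Nat)) (dist : PySem.Dict Int Nat),
      pvInvQ roads S (Q.map (fun p => (p.2, p.1))) dist.keys →
      (∀ u n, dist.get? u = some n → pvMinW roads S u n) →
      Q.length + pvRem roads dist.keys ≤ fuel →
      (∀ u n, (pvDistB (pvGraphA roads) fuel Q dist).get? u = some n → pvMinW roads S u n) ∧
      (∀ u k, pvWalk roads k S u → (pvDistB (pvGraphA roads) fuel Q dist).contains u = true) := by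
  intro fuel
  induction fuel with
  | zero =>
    intro Q dist hinv hsound hfuel
    have hQ : Q = [] := by cases Q with | nil => rfl | cons p l => simp at hfuel
    subst hQ
    refine ⟨hsound, ?_⟩
    intro u k hk
    rcases pvInvQ_reach hinv k u hk with hv | ⟨p, hp, _⟩
    · exact (PySem.Dict.contains_iff_mem_keys ..).mpr hv
    · simp at hp
  | succ fuel ih =>
    intro Q dist hinv hsound hfuel
    match Q with
    | [] =>
      refine ⟨hsound, ?_⟩
      intro u k hk
      rcases pvInvQ_reach hinv k u hk with hv | ⟨p, hp, _⟩
      · exact (PySem.Dict.contains_iff_mem_keys ..).mpr hv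
      · simp at hp
    | (u, d) :: rest =>
      obtain ⟨hA, hC0, hE, hOrd⟩ := hinv
      have hAhead : pvWalk roads d S u := hA (d, u) (List.mem_cons_self ..)
      have hOrdHead := (List.pairwise_cons.mp hOrd).1
      have hOrdRest := (List.pairwise_cons.mp hOrd).2
      simp only [pvDistB]
      by_cases hvis : PySem.Dict.contains dist u
      · rw [if_pos hvis]
        have hcurV : u ∈ dist.keys := (PySem.Dict.contains_iff_mem_keys ..).mp hvis
        apply ih rest dist ?_ hsound ?_
        · refine ⟨fun p hp => hA p (List.mem_cons_of_mem _ hp), ?_, ?_, hOrdRest⟩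
          · rcases hC0 with h | h
            · exact Or.inl h
            · rcases List.mem_cons.mp h with he | h'
              · injection he with h1 h2
                exact Or.inl (by rw [h2]; exact hcurV)
              · exact Or.inr h'
          · intro v hv k hk w hew
            rcases hE v hv k hk w hew with hw | ⟨dd, hdd, hle⟩
            · exact Or.inl hw
            · rcases List.mem_cons.mp hdd with he | h'
              · injection he with h1 h2
                exact Or.inl (by rw [h2]; exact hcurV)
              · exact Or.inr ⟨dd, h', hle⟩
        · simp only [List.length_cons] at hfuel
          omega
      · rw [if_neg hvis]
        have hcurV : u ∉ dist.keys := fun h => hvis ((PySem.Dict.contains_iff_mem_keys ..).mpr h)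
        have hmind : ∀ k, pvWalk roads k S u → d ≤ k := by
          intro k hk
          by_contra hlt
          apply hcurV
          apply pvInvQ_vis ⟨hA, hC0, hE, hOrd⟩ hk
          intro p hp
          simp only [List.map_cons] at hp
          rcases List.mem_cons.mp hp with rfl | hp'
          · exact (by omega : k < d)
          · have h2 : d ≤ p.1 := (hOrdHead p hp').1
            omega
        have hkeys : (dist.insert u d).keys = dist.keys ++ [u] := by
          apply PySem.Dict.keys_insert_of_not_contains
          exact Bool.not_eq_true _ ▸ (by simpa using hvis)
        have hsound' : ∀ v n, (dist.insert u d).get? v = some n → pvMinW roads S v n := by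
          intro v n hv
          rw [PySem.Dict.get?_insert] at hv
          by_cases hvu : v = u
          · rw [if_pos hvu] at hv
            injection hv with hn
            subst hvu; subst hn
            exact ⟨hAhead, fun j hj hw => absurd (hmind j hw) (by omega)⟩
          · rw [if_neg hvu] at hv
            exact hsound v n hv
        apply ih _ _ ?_ hsound' ?_
        · rw [hkeys]
          have hmapq : (rest ++ (PySem.Dict.getD (pvGraphA roads) u []).map
              (fun v => (v, d + 1))).map (fun p => (p.2, p.1)) =
              rest.map (fun p => (p.2, p.1)) ++
              (PySem.Dict.getD (pvGraphA roads) u []).map (fun nb => (d + 1, nb)) := by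
            rw [List.map_append, List.map_map]
            rfl
          rw [hmapq]
          refine ⟨?_, ?_, ?_, ?_⟩
          · intro p hp
            rcases List.mem_append.mp hp with h | h
            · exact hA p (List.mem_cons_of_mem _ h)
            · rcases List.mem_map.mp h with ⟨nb, hnb, rfl⟩
              exact pvWalk_snoc hAhead ((pv_mem_adj roads u nb).mp hnb)
          · rcases hC0 with h | h
            · exact Or.inl (List.mem_append.mpr (Or.inl h))
            · rcases List.mem_cons.mp h with he | h'
              · injection he with h1 h2
                exact Or.inl (List.mem_append.mpr (Or.inr (by rw [h2]; simp)))
              · exact Or.inr (List.mem_append.mpr (Or.inl h'))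
          · intro v hv k hk w hew
            rcases List.mem_append.mp hv with hvV | hvcur
            · rcases hE v hvV k hk w hew with hw | ⟨dd, hdd, hle⟩
              · exact Or.inl (List.mem_append.mpr (Or.inl hw))
              · rcases List.mem_cons.mp hdd with he | h'
                · injection he with h1 h2
                  exact Or.inl (List.mem_append.mpr (Or.inr (by rw [h2]; simp)))
                · exact Or.inr ⟨dd, List.mem_append.mpr (Or.inl h'), hle⟩
            · have hvcur : v = u := by simpa using hvcur
              subst hvcur
              have hle : d + 1 ≤ k + 1 := by have := hmind k hk; omega
              refine Or.inr ⟨d + 1, List.mem_append.mpr (Or.inr ?_), hle⟩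
              exact List.mem_map.mpr ⟨w, (pv_mem_adj roads v w).mpr hew, rfl⟩
          · rw [List.pairwise_append]
            refine ⟨hOrdRest, ?_, ?_⟩
            · rw [List.pairwise_map]
              exact List.pairwise_of_forall (fun a b => ⟨Nat.le_refl _, by omega⟩)
            · intro a ha b hb
              rcases List.mem_map.mp hb with ⟨nb, _, rfl⟩
              have h1 : d ≤ a.1 := (hOrdHead a ha).1
              have h2 : a.1 ≤ d + 1 := (hOrdHead a ha).2
              exact ⟨by omega, by omega⟩
        · rw [List.length_append, List.length_map, hkeys]
          have hsplit := pvRem_split roads dist.keys u hcurV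
          simp only [List.length_cons] at hfuel
          omega

-- the length of the path A's find_path_bfs returns: shortest distance + 1, or 0 if unreachable
theorem pvFindLen (roads : List (Int × Int)) (s t : Int) :
    (∀ n, pvMinW roads s t n → (find_path_bfs roads s t).length = n + 1) ∧
    ((∀ n, ¬ pvWalk roads n s t) → (find_path_bfs roads s t).length = 0) := by
  have hinv0 : pvInv t [(PySem.Set.ofList [], s)] (PySem.Set.ofList []) := by
    intro p hp; simp at hp; subst hp; simp
  have hlock := pvBfsA_len_eq_pvDqA (pvGraphA roads) t (2 * roads.length + 2)
    [(PySem.Set.ofList [], s)] (PySem.Set.ofList []) hinv0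
  have hinv : pvInvQ roads s [(0, s)] [] := by
    refine ⟨?_, Or.inr (List.mem_cons_self ..), ?_, ?_⟩
    · intro p hp; simp at hp; subst hp; rfl
    · intro u hu; simp at hu
    · simp
  have hcor := pvDqA_correct roads s t (2 * roads.length + 2) [(0, s)] [] hinv (by simp)
    (by rw [List.length_cons, List.length_nil, pvRem_nil]; omega)
  rw [find_path_bfs, ← hlock]
  exact hcor

-- the distance dict B builds from source S: sound values, and defined on every reachable node
theorem pvDists_spec (roads : List (Int × Int)) (S : Int) :
    (∀ u n, (pvDistB (pvGraphA roads) (2 * roads.length + 2) [(S, 0)]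
        PySem.Dict.empty).get? u = some n → pvMinW roads S u n) ∧
    (∀ u k, pvWalk roads k S u → (pvDistB (pvGraphA roads) (2 * roads.length + 2) [(S, 0)]
        PySem.Dict.empty).contains u = true) := by
  apply pvDistB_correct roads S (2 * roads.length + 2) [(S, 0)] PySem.Dict.empty
  · refine ⟨?_, ?_, ?_, ?_⟩
    · intro p hp; simp at hp; subst hp; rfl
    · exact Or.inr (by simp)
    · intro u hu; simp [PySem.Dict.keys_empty] at hu
    · simp
  · intro u n h; rw [PySem.Dict.get?_empty] at h; cases h
  · rw [List.length_cons, List.length_nil, PySem.Dict.keys_empty, pvRem_nil]; omega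

theorem pv_foldl_flatMap {α β γ : Type} (g : α → List β) (f : γ → β → γ) :
    ∀ (l : List α) (acc : γ),
      (l.flatMap g).foldl f acc = l.foldl (fun a x => (g x).foldl f a) acc := by
  intro l
  induction l with
  | nil => intro acc; rfl
  | cons h tl ih => intro acc; simp [List.flatMap_cons, List.foldl_append, ih]

-- the candidate pairs A collects into possibleroads are pairwise distinct
theorem pv_cand_nodup (b : Int) (path : PySem.Set Int) (roads : List (Int × Int)) :
    ((PySem.List.pyRange 1 b 1).flatMap (fun x =>
      ((PySem.List.pyRange (x + 1) (b + 1) 1).filter (fun y =>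
        !roads.contains (x, y) && !(PySem.Set.contains path x && PySem.Set.contains path y))).map
        (fun y => (x, y)))).Nodup := by
  rw [List.nodup_flatMap]
  constructor
  · intro x _
    apply List.Nodup.map
    · intro a b h; exact (Prod.mk.injEq _ _ _ _).mp h |>.2
    · exact (PySem.List.nodup_pyRange_one _ _).filter _
  · apply List.Pairwise.imp ?_ (PySem.List.pairwise_lt_pyRange_one 1 b)
    intro x1 x2 hlt a ha hb
    rcases List.mem_map.mp ha with ⟨y1, _, rfl⟩
    rcases List.mem_map.mp hb with ⟨y2, _, h⟩
    have : x2 = x1 := ((Prod.mk.injEq _ _ _ _).mp h).1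
    omega

-- the heart of the equivalence: A's per-candidate BFS test agrees with B's O(1) distance test
theorem pv_cand_eq (roads : List (Int × Int)) (s t x y : Int) (hm : (x, y) ∉ roads)
    (ds dt : PySem.Dict Int Nat)
    (hds1 : ∀ u n, ds.get? u = some n → pvMinW roads s u n)
    (hds2 : ∀ u k, pvWalk roads k s u → ds.contains u = true)
    (hdt1 : ∀ u n, dt.get? u = some n → pvMinW roads t u n)
    (hdt2 : ∀ u k, pvWalk roads k t u → dt.contains u = true)
    (tot : Int) :
    (if (find_path_bfs roads s t).length ≤
        (find_path_bfs (PySem.Set.union roads [(x, y)]) s t).length then tot + 1 else tot) =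
      (match ds.get? t with
        | none => tot + 1
        | some bb =>
            if pvShortens ds dt bb x y || pvShortens ds dt bb y x then tot else tot + 1) := by
  have hroads' : PySem.Set.union roads [(x, y)] = roads ++ [(x, y)] := by
    rw [pv_union_singleton, PySem.Set.add_of_not_mem hm]
  rw [hroads']
  cases hbase : ds.get? t with
  | none =>
    have hunreach : ∀ n, ¬ pvWalk roads n s t := by
      intro n hn
      have hc := hds2 t n hn
      rw [PySem.Dict.contains_eq_isSome_get?, hbase] at hc
      simp at hc
    rw [(pvFindLen roads s t).2 hunreach]
    simp
  | some bb =>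
    have hminb : pvMinW roads s t bb := hds1 t bb hbase
    have hlenP : (find_path_bfs roads s t).length = bb + 1 := (pvFindLen roads s t).1 bb hminb
    have hreach' : pvWalk (roads ++ [(x, y)]) bb s t := pvWalk_mono hminb.1
    obtain ⟨d', hmin'⟩ := pv_exists_minW ⟨bb, hreach'⟩
    have hlenN : (find_path_bfs (roads ++ [(x, y)]) s t).length = d' + 1 :=
      (pvFindLen _ s t).1 d' hmin'
    have hd'bb : d' ≤ bb := pvMinW_le hmin' hreach'
    rw [hlenP, hlenN]
    have hiff : (pvShortens ds dt bb x y || pvShortens ds dt bb y x) = true ↔ d' < bb := by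
      constructor
      · intro h
        rcases Bool.or_eq_true_iff.mp h with h | h
        · obtain ⟨du, hdx⟩ : ∃ du, ds.get? x = some du := by
            cases hdx : ds.get? x with
            | none => simp [pvShortens, hdx] at h
            | some du => exact ⟨du, rfl⟩
          obtain ⟨dv, hdy⟩ : ∃ dv, dt.get? y = some dv := by
            cases hdy : dt.get? y with
            | none => simp [pvShortens, hdx, hdy] at h
            | some dv => exact ⟨dv, rfl⟩
          have hlt : du + 1 + dv < bb := by simpa [pvShortens, hdx, hdy] using h
          have hwx : pvWalk (roads ++ [(x, y)]) du s x := pvWalk_mono (hds1 x du hdx).1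
          have hwy : pvWalk (roads ++ [(x, y)]) dv y t :=
            pvWalk_mono (pvWalk_symm (hdt1 y dv hdy).1)
          have hexy : pvEdg (roads ++ [(x, y)]) x y := Or.inl (by simp)
          have hw : pvWalk (roads ++ [(x, y)]) (du + (dv + 1)) s t :=
            pvWalk_append hwx (show pvWalk (roads ++ [(x, y)]) (dv + 1) x t from ⟨y, hexy, hwy⟩)
          have := pvMinW_le hmin' hw
          omega
        · obtain ⟨du, hdx⟩ : ∃ du, ds.get? y = some du := by
            cases hdx : ds.get? y with
            | none => simp [pvShortens, hdx] at h
            | some du => exact ⟨du, rfl⟩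
          obtain ⟨dv, hdy⟩ : ∃ dv, dt.get? x = some dv := by
            cases hdy : dt.get? x with
            | none => simp [pvShortens, hdx, hdy] at h
            | some dv => exact ⟨dv, rfl⟩
          have hlt : du + 1 + dv < bb := by simpa [pvShortens, hdx, hdy] using h
          have hwx : pvWalk (roads ++ [(x, y)]) du s y := pvWalk_mono (hds1 y du hdx).1
          have hwy : pvWalk (roads ++ [(x, y)]) dv x t :=
            pvWalk_mono (pvWalk_symm (hdt1 x dv hdy).1)
          have hexy : pvEdg (roads ++ [(x, y)]) y x := Or.inr (by simp)
          have hw : pvWalk (roads ++ [(x, y)]) (du + (dv + 1)) s t :=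
            pvWalk_append hwx (show pvWalk (roads ++ [(x, y)]) (dv + 1) y t from ⟨x, hexy, hwy⟩)
          have := pvMinW_le hmin' hw
          omega
      · intro hlt
        rcases pvWalk_decomp roads x y d' s t hmin'.1 with ⟨j, hj, hw⟩ | ⟨a, b0, hab, hc | hc⟩
        · exact absurd hw (hminb.2 j (by omega))
        · obtain ⟨hax, hby⟩ := hc
          obtain ⟨du, hdx⟩ : ∃ du, ds.get? x = some du := by
            have := hds2 x a hax
            rw [PySem.Dict.contains_eq_isSome_get?] at this
            cases hdx : ds.get? x with
            | none => rw [hdx] at this; simp at this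
            | some du => exact ⟨du, rfl⟩
          obtain ⟨dv, hdy⟩ : ∃ dv, dt.get? y = some dv := by
            have := hdt2 y b0 (pvWalk_symm hby)
            rw [PySem.Dict.contains_eq_isSome_get?] at this
            cases hdy : dt.get? y with
            | none => rw [hdy] at this; simp at this
            | some dv => exact ⟨dv, rfl⟩
          have h1 : du ≤ a := pvMinW_le (hds1 x du hdx) hax
          have h2 : dv ≤ b0 := pvMinW_le (hdt1 y dv hdy) (pvWalk_symm hby)
          apply Bool.or_eq_true_iff.mpr
          exact Or.inl (by simp [pvShortens, hdx, hdy]; omega)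
        · obtain ⟨hax, hby⟩ := hc
          obtain ⟨du, hdx⟩ : ∃ du, ds.get? y = some du := by
            have := hds2 y a hax
            rw [PySem.Dict.contains_eq_isSome_get?] at this
            cases hdx : ds.get? y with
            | none => rw [hdx] at this; simp at this
            | some du => exact ⟨du, rfl⟩
          obtain ⟨dv, hdy⟩ : ∃ dv, dt.get? x = some dv := by
            have := hdt2 x b0 (pvWalk_symm hby)
            rw [PySem.Dict.contains_eq_isSome_get?] at this
            cases hdy : dt.get? x with
            | none => rw [hdy] at this; simp at this
            | some dv => exact ⟨dv, rfl⟩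
          have h1 : du ≤ a := pvMinW_le (hds1 y du hdx) hax
          have h2 : dv ≤ b0 := pvMinW_le (hdt1 x dv hdy) (pvWalk_symm hby)
          apply Bool.or_eq_true_iff.mpr
          exact Or.inr (by simp [pvShortens, hdx, hdy]; omega)
    by_cases hsh : d' < bb
    · rw [if_neg (by omega)]
      show tot =
        if (pvShortens ds dt bb x y || pvShortens ds dt bb y x) = true then tot else tot + 1
      rw [if_pos (hiff.mpr hsh)]
    · rw [if_pos (by omega)]
      show tot + 1 =
        if (pvShortens ds dt bb x y || pvShortens ds dt bb y x) = true then tot else tot + 1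
      rw [if_neg (fun h => hsh (hiff.mp h))]

theorem pv_main (b r s t : Int) (roads : List (Int × Int)) :
    howmanyroads b r s t roads = howmanyroads_alt b r s t roads := by
  have hinv0 : pvInv t [([], s)] (PySem.Set.ofList []) := by
    intro p hp; simp at hp; subst hp; simp
  have hpath : pvTrailB (pvAdjB roads) t (2 * roads.length + 2) [([], s)]
      (PySem.Set.ofList []) = find_path_bfs roads s t := by
    rw [find_path_bfs]
    exact (pvBfsA_eq_pvTrailB _ _ _ _ _ hinv0).symm
  obtain ⟨hds1, hds2⟩ := pvDists_spec roads s
  obtain ⟨hdt1, hdt2⟩ := pvDists_spec roads t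
  simp only [howmanyroads, howmanyroads_alt]
  rw [hpath]
  set P := find_path_bfs roads s t with hP
  have honp : ∀ z : Int, PySem.Set.contains (PySem.Set.ofList P) z = PySem.Set.contains P z := by
    intro z
    rw [Bool.eq_iff_iff, PySem.Set.contains_iff, PySem.Set.contains_iff, PySem.Set.mem_ofList]
  rw [PySem.Set.ofList_eq_self_of_nodup _ (pv_cand_nodup b P roads)]
  rw [pv_foldl_flatMap]
  congr 1
  funext tot x
  rw [List.foldl_map, ← PySem.List.foldl_if_eq_foldl_filter]
  congr 1
  funext tot' y
  by_cases hm : (x, y) ∈ roads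
  · simp [hm]
  · by_cases hp2 : x ∈ P ∧ y ∈ P
    · simp [hm, hp2]
    · have hcx : (PySem.Set.contains P x && PySem.Set.contains P y) = false := by
        cases hx : PySem.Set.contains P x with
        | false => simp
        | true =>
          cases hy : PySem.Set.contains P y with
          | false => simp
          | true =>
            exact absurd ⟨(PySem.Set.contains_iff ..).mp hx, (PySem.Set.contains_iff ..).mp hy⟩
              hp2
      have hcm : roads.contains (x, y) = false := by
        simpa using hm
      simp only [honp, hcx, hcm, Bool.or_false, Bool.not_false, Bool.and_true, if_true]
      rw [if_neg (show ¬ (false = true) by simp)]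
      have := pv_cand_eq roads s t x y hm _ _ hds1 hds2 hdt1 hdt2 tot'
      simpa [PySem.Set.len] using this

-- ===== VERDICT (by name: the statement is the Claim_ definition above) =====
theorem howmanyroads_spec : Claim_equal_howmanyroads := by
  intro b r s t roads _
  unfold Spec_howmanyroads
  exact pv_main b r s t roads
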